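-- pv_equiv track=rewrite | github.com/HotMaps/excess_heat_cm | cm/app/api_v1/my_calculation_module_directory/excess_heat/utility.py | transpose4with1
-- ===== SOURCE A (Python) =====
-- def transpose4with1(array):
--     template = [[[[] for _ in subsub] for subsub in subarray] for subarray in array[0]]
--     for subarray in array:
--         for i, subsub in enumerate(subarray):
--             for j, subsubsub in enumerate(subsub):
--                 for k, value in enumerate(subsubsub):
--                     template[i][j][k].append(value)
--     return template
-- ===== SOURCE B (Python) =====
-- def transpose4with1(array):
--     first = array[0]
--     return [[[[subarray[i][j][k] for subarray in array]
--               for k in range(len(first[i][j]))]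
--              for j in range(len(first[i]))]
--             for i in range(len(first))]
-- ===== Notes on version B (the rewrite author's own statement) =====
-- stated objective: idiomatic
-- what changed: Replaces the preallocate-template-and-scatter-appends loop nest with a direct gather: nested comprehensions over the shape of array[0] whose innermost cell reads subarray[i][j][k] across the outer axis.
-- outside the precondition, e.g. on transpose4with1([[[[1]]], [[]]]): A returns [[[[1]]]], B raises IndexError
import Mathlib
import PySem

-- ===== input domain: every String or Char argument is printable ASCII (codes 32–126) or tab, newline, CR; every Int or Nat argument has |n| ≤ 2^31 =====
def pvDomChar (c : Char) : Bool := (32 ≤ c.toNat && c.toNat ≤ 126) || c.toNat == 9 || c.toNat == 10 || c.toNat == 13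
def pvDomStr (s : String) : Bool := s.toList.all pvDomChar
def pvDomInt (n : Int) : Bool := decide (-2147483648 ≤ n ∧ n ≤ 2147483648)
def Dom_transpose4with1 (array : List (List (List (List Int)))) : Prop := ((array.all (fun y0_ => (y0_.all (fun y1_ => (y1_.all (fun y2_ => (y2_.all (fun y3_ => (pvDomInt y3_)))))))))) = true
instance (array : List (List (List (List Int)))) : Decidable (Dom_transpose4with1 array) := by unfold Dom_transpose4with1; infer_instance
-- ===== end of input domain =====

-- B replaces A's preallocate-and-scatter-append loops with a direct gather by nested
-- comprehensions over the shape of array[0] (idiomatic; same cost).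

-- ===== PORT A =====
-- Literal transliteration of A: build a template of empty cells from array[0]
-- (array[0] raises IndexError on [] — excluded by Pre_; headD [] is exact inside Pre_),
-- then scatter: template[i][j][k].append(value) becomes List.modify at the enumerate
-- indices (nonnegative, so .toNat is exact).
def transpose4with1 (array : List (List (List (List Int)))) : List (List (List (List Int))) :=
  let template := (array.headD []).map (fun subarray =>
    subarray.map (fun subsub => subsub.map (fun _ => ([] : List Int))))
  array.foldl (fun template subarray =>
    (PySem.List.enumerate subarray).foldl (fun template p =>
      (PySem.List.enumerate p.2).foldl (fun template q =>
        (PySem.List.enumerate q.2).foldl (fun template r =>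
          template.modify p.1.toNat (fun t2 =>
            t2.modify q.1.toNat (fun t3 =>
              t3.modify r.1.toNat (fun cell => cell ++ [r.2])))) template) template) template)
    template

-- ===== PORT B =====
-- Gather over a shape source and an outer list; transpose4with1_alt instantiates both
-- from the input exactly as Source B does (indexing is in range inside Pre_, so getD is exact).
def gather4 (first : List (List (List Int))) (array : List (List (List (List Int)))) :
    List (List (List (List Int))) :=
  (List.range first.length).map (fun i =>
    (List.range (first.getD i []).length).map (fun j =>
      (List.range ((first.getD i []).getD j []).length).map (fun k =>
        array.map (fun subarray => ((subarray.getD i []).getD j []).getD k 0))))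

def transpose4with1_alt (array : List (List (List (List Int)))) : List (List (List (List Int))) :=
  gather4 (array.headD []) array

-- ===== PRECONDITION & SPEC =====
-- the nested lengths of a 3-level slice
def shape3 (s : List (List (List Int))) : List (List Nat) :=
  s.map (fun u => u.map List.length)

-- Pre_ excludes the empty outer list (A raises IndexError on array[0]) and ragged inputs
-- whose subarrays do not all share array[0]'s nested shape: there A either raises
-- IndexError or returns an accidental partially-filled template while B raises IndexError.
def Pre_transpose4with1 (array : List (List (List (List Int)))) : Prop :=
  array ≠ [] ∧ ∀ s ∈ array, shape3 s = shape3 (array.headD [])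
instance (array : List (List (List (List Int)))) : Decidable (Pre_transpose4with1 array) := by
  unfold Pre_transpose4with1; infer_instance

def pvWitness_transpose4with1 : List (List (List (List Int))) :=
  [[[[1], [2, 3]], [[4]]], [[[5], [6, 7]], [[8]]]]

def Spec_transpose4with1 (array : List (List (List (List Int)))) (out : List (List (List (List Int)))) : Prop := out = transpose4with1_alt array
instance (array : List (List (List (List Int)))) (out : List (List (List (List Int)))) : Decidable (Spec_transpose4with1 array out) := by unfold Spec_transpose4with1; infer_instance

-- ===== CLAIM (what is proved, stated in full; the proofs are below) =====
def Claim_equal_transpose4with1 : Prop := ∀ (array : List (List (List (List Int)))), Dom_transpose4with1 array → Pre_transpose4with1 array → Spec_transpose4with1 array (transpose4with1 array)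

-- ===== LEMMAS AND PROOFS =====

-- modify twice at the same index composes
theorem pv_modify_modify {β : Type} (l : List β) (i : Nat) (f g : β → β) :
    (l.modify i f).modify i g = l.modify i (fun t => g (f t)) := by
  induction l generalizing i with
  | nil => simp
  | cons x xs ih => cases i <;> simp [List.modify_cons, ih]

theorem pv_modify_id {β : Type} (l : List β) (i : Nat) :
    l.modify i (fun t => t) = l := by
  induction l generalizing i with
  | nil => simp
  | cons x xs ih => cases i <;> simp [List.modify_cons, ih]

-- a fold whose every step modifies the SAME position is one modify of the folded function
theorem pv_foldl_modify_fixed {α β : Type} (L : List α) (T : List β) (i : Nat) (f : α → β → β) :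
    L.foldl (fun T x => T.modify i (f x)) T
      = T.modify i (fun t => L.foldl (fun t x => f x t) t) := by
  induction L generalizing T with
  | nil => simp [pv_modify_id]
  | cons x xs ih => simp [List.foldl_cons, ih, pv_modify_modify]

-- shifting the enumerate offset past a cons
theorem pv_enum_fold_cons {α β : Type} (S : List α) (n : Int) (hn : 0 ≤ n)
    (t : β) (T : List β) (f : α → β → β) :
    (PySem.List.enumerate S (n + 1)).foldl (fun T p => T.modify p.1.toNat (f p.2)) (t :: T)
      = t :: (PySem.List.enumerate S n).foldl (fun T p => T.modify p.1.toNat (f p.2)) T := by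
  induction S generalizing n t T with
  | nil => simp [PySem.List.enumerate_nil]
  | cons x S ih =>
      have h1 : (n + 1).toNat = n.toNat + 1 := by omega
      simp only [PySem.List.enumerate_cons, List.foldl_cons]
      rw [h1, List.modify_cons]
      simp only [Nat.succ_ne_zero, if_false, Nat.add_sub_cancel]
      exact ih (n + 1) (by omega) t (T.modify n.toNat (f x))

-- a fold over enumerate modifying at the running index, on a list of the same length,
-- is a zipWith
theorem pv_enum_fold_zip {α β : Type} (S : List α) (T : List β) (f : α → β → β)
    (h : S.length = T.length) :
    (PySem.List.enumerate S).foldl (fun T p => T.modify p.1.toNat (f p.2)) T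
      = List.zipWith (fun x t => f x t) S T := by
  induction S generalizing T with
  | nil => simp [PySem.List.enumerate_nil]; simp at h; simp [List.length_eq_zero_iff.mp h.symm]
  | cons x S ih =>
      cases T with
      | nil => simp at h
      | cons t T =>
          simp only [PySem.List.enumerate_cons, List.foldl_cons, List.zipWith_cons_cons]
          rw [show ((0 : Int)).toNat = 0 from rfl, List.modify_cons]
          simp only [if_true]
          rw [show ((0 : Int) + 1) = (0 : Int) + 1 from rfl]
          rw [pv_enum_fold_cons S 0 (by omega) (f x t) T f]
          rw [ih T (by simpa using h)]

theorem pv_template_eq (first : List (List (List Int))) :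
    first.map (fun subarray => subarray.map (fun subsub => subsub.map (fun _ => ([] : List Int))))
      = gather4 first [] := by
  unfold gather4
  apply List.ext_getElem (by simp)
  intro i h1 h2
  have hi : i < first.length := by simpa using h1
  simp only [List.getElem_map, List.getElem_range]
  rw [List.getD_eq_getElem first [] hi]
  apply List.ext_getElem (by simp)
  intro j hj1 hj2
  have hj : j < first[i].length := by simpa using hj1
  simp only [List.getElem_map, List.getElem_range]
  rw [List.getD_eq_getElem first[i] [] hj]
  apply List.ext_getElem (by simp)
  intro k hk1 hk2
  simp

-- one scatter pass over a shape-equal subarray appends its values to every cell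
theorem pv_step (first S : List (List (List Int))) (p : List (List (List (List Int))))
    (hS : shape3 S = shape3 first) :
    (PySem.List.enumerate S).foldl (fun template q2 =>
      (PySem.List.enumerate q2.2).foldl (fun template q =>
        (PySem.List.enumerate q.2).foldl (fun template r =>
          template.modify q2.1.toNat (fun t2 =>
            t2.modify q.1.toNat (fun t3 =>
              t3.modify r.1.toNat (fun cell => cell ++ [r.2])))) template) template)
      (gather4 first p)
      = gather4 first (p ++ [S]) := by
  have hlen0 : S.length = first.length := by
    have := congrArg List.length hS; simpa [shape3] using this
  simp only [pv_foldl_modify_fixed]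
  refine Eq.trans (pv_enum_fold_zip S (gather4 first p)
    (fun ss t => List.foldl (fun t x => t.modify x.1.toNat fun t =>
        List.foldl (fun t x => t.modify x.1.toNat fun cell => cell ++ [x.2]) t
          (PySem.List.enumerate x.2)) t (PySem.List.enumerate ss))
    (by simp [gather4, hlen0])) ?_
  apply List.ext_getElem (by simp [gather4, hlen0])
  intro i hi1 hi2
  have hiS : i < S.length := (by simpa using hi1 : i < S.length ∧ _).1
  have hif : i < first.length := hlen0 ▸ hiS
  have hsh_i : S[i].map List.length = first[i].map List.length := by
    have := List.getElem_of_eq hS (by simpa [shape3] using hiS)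
    simpa [shape3] using this
  have hlen1 : S[i].length = first[i].length := by
    have := congrArg List.length hsh_i; simpa using this
  simp only [List.getElem_zipWith, gather4, List.getElem_map, List.getElem_range]
  rw [List.getD_eq_getElem first [] hif]
  refine Eq.trans (pv_enum_fold_zip S[i]
    (List.map (fun j =>
        List.map (fun k => List.map (fun subarray => ((subarray.getD i []).getD j []).getD k 0) p)
          (List.range (first[i].getD j []).length))
      (List.range first[i].length))
    (fun ss t => List.foldl (fun t x => t.modify x.1.toNat fun cell => cell ++ [x.2]) t
      (PySem.List.enumerate ss))
    (by simp [hlen1])) ?_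
  apply List.ext_getElem (by simp [hlen1])
  intro j hj1 hj2
  have hjb : j < S[i].length ∧ j < first[i].length := by
    constructor <;> [skip; rw [← hlen1]] <;> · simp at hj1; omega
  obtain ⟨hjS, hjf⟩ := hjb
  have hsh_ij : S[i][j].length = first[i][j].length := by
    have := List.getElem_of_eq hsh_i (by simpa using hjS)
    simpa using this
  simp only [List.getElem_zipWith, List.getElem_map, List.getElem_range]
  rw [List.getD_eq_getElem first[i] [] hjf]
  refine Eq.trans (pv_enum_fold_zip S[i][j]
    (List.map (fun k => List.map (fun subarray => ((subarray.getD i []).getD j []).getD k 0) p)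
      (List.range first[i][j].length))
    (fun v cell => cell ++ [v])
    (by simp [hsh_ij])) ?_
  apply List.ext_getElem (by simp [hsh_ij])
  intro k hk1 hk2
  have hkb : k < S[i][j].length := by simp at hk1; omega
  simp only [List.getElem_zipWith, List.getElem_map, List.getElem_range, List.map_append,
    List.map_cons, List.map_nil]
  rw [List.getD_eq_getElem S [] hiS, List.getD_eq_getElem S[i] [] hjS,
    List.getD_eq_getElem S[i][j] 0 hkb]

theorem pv_fold_gather (first : List (List (List Int))) (L p : List (List (List (List Int))))
    (hL : ∀ s ∈ L, shape3 s = shape3 first) :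
    L.foldl (fun template subarray =>
      (PySem.List.enumerate subarray).foldl (fun template q2 =>
        (PySem.List.enumerate q2.2).foldl (fun template q =>
          (PySem.List.enumerate q.2).foldl (fun template r =>
            template.modify q2.1.toNat (fun t2 =>
              t2.modify q.1.toNat (fun t3 =>
                t3.modify r.1.toNat (fun cell => cell ++ [r.2])))) template) template) template)
      (gather4 first p)
      = gather4 first (p ++ L) := by
  induction L generalizing p with
  | nil => simp
  | cons S L ih =>
      simp only [List.foldl_cons]
      rw [pv_step first S p (hL S (by simp))]
      rw [ih (p ++ [S]) (fun s hs => hL s (by simp [hs]))]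
      simp

-- ===== VERDICT (by name: the statement is the Claim_ definition above) =====
theorem transpose4with1_spec : Claim_equal_transpose4with1 := by
  intro array _ hpre
  obtain ⟨hne, hsh⟩ := hpre
  unfold Spec_transpose4with1 transpose4with1 transpose4with1_alt
  rw [pv_template_eq]
  have := pv_fold_gather (array.headD []) array [] hsh
  simpa using this
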